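-- pv_equiv track=rewrite | github.com/lanfordhugo/protocol-parse | src/protocol_parse.py | parsed_one_byte_data
-- ===== SOURCE A (Python) =====
-- def get_multi_bit_val(byte, start, bit_number):
--     """
--     获取多个bit位数据大小
--     """
--     return (byte >> start) & (0xff >> (8 - bit_number))
--
-- def parsed_one_byte_data(byte, bit_data_format, bit_key_format):
--     bit_parsed_dict = {}
--
--     cur_bit_index = 0  # 记录当前处理在一个字节的第几位
--     for index, one_field_len in enumerate(bit_data_format):
--         # 根据此字段占bit数据分别处理
--         data_ = get_multi_bit_val(byte, cur_bit_index, one_field_len)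
--         bit_parsed_dict.update({bit_key_format[index]: data_})
--         cur_bit_index = cur_bit_index + one_field_len
--     return bit_parsed_dict
-- ===== SOURCE B (Python) =====
-- def parsed_one_byte_data(byte, bit_data_format, bit_key_format):
--     def fields(rem, widths, keys):
--         # recursively consume the (already shifted) remainder of the byte
--         if not widths:
--             return []
--         w = widths[0]
--         return [(keys[0], rem & (0xff >> (8 - w)))] + fields(rem >> w, widths[1:], keys[1:])
--     return dict(fields(byte, bit_data_format, bit_key_format))
-- ===== Notes on version B (the rewrite author's own statement) =====
-- stated objective: alternative
-- what changed: B replaces A's imperative loop that threads a cumulative bit-offset and mutates a dict with a pure recursion over both lists that destructively consumes the byte itself (masking the shifted remainder and passing rem >> width onward), producing a list of (key, value) pairs converted to a dict at the end.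
-- outside the precondition, e.g. on parsed_one_byte_data(5, [3, -1], ['a', 'b']): A returns {'a': 5, 'b': 0}, B raises ValueError; on parsed_one_byte_data(5, [-1], ['a']): A returns {'a': 0}, B raises ValueError
import Mathlib
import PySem

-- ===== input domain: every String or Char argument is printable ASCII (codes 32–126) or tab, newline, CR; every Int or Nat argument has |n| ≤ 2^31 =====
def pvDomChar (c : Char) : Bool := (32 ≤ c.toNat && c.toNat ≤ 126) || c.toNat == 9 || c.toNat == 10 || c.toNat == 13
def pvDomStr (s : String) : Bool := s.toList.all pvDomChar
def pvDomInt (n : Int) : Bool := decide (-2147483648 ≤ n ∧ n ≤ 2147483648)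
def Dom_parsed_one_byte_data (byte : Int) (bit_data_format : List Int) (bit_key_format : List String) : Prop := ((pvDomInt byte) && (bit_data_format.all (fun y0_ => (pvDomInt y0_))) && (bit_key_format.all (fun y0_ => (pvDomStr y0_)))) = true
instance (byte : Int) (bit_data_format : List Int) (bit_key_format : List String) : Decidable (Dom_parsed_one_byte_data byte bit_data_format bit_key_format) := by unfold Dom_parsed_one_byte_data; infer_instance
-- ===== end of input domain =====

-- B replaces A's offset-threading loop with dict mutation by a pure recursion that consumes the
-- shifted byte remainder and builds a (key, value) pair list turned into a dict at the end
-- (objective: alternative).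

-- ===== PORT A =====
def get_multi_bit_val (byte : Int) (start : Int) (bit_number : Int) : Int :=
  PySem.Int.band (byte >>> start.toNat) ((0xff : Int) >>> (8 - bit_number).toNat)

-- the 'for index, one_field_len in enumerate(...)' loop, threading (cur_bit_index, dict)
def pvParseLoopA (byte : Int) (bit_key_format : List String) :
    List (Int × Int) → Int → PySem.Dict String Int → PySem.Dict String Int
  | [], _, d => d
  | (index, one_field_len) :: rest, cur, d =>
      pvParseLoopA byte bit_key_format rest (cur + one_field_len)
        (d.insert ((PySem.List.pyGet? bit_key_format index).getD "")
          (get_multi_bit_val byte cur one_field_len))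

def parsed_one_byte_data (byte : Int) (bit_data_format : List Int) (bit_key_format : List String) : List (String × Int) :=
  (pvParseLoopA byte bit_key_format (PySem.List.enumerate bit_data_format 0) 0 PySem.Dict.empty).items

-- ===== PORT B =====
-- Source B's inner 'fields': recursion on the two lists, threading the shifted remainder
-- (keys[0] is pyGet? keys 0; keys[1:] / widths[1:] on a nonneg start index is List.drop 1, exact)
def pvFieldsB : Int → List Int → List String → List (String × Int)
  | _, [], _ => []
  | rem, w :: ws, keys =>
      (((PySem.List.pyGet? keys 0).getD ""),
        PySem.Int.band rem ((0xff : Int) >>> (8 - w).toNat))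
        :: pvFieldsB (rem >>> w.toNat) ws (keys.drop 1)

def parsed_one_byte_data_alt (byte : Int) (bit_data_format : List Int) (bit_key_format : List String) : List (String × Int) :=
  (PySem.Dict.ofList (pvFieldsB byte bit_data_format bit_key_format)).items

-- ===== PRECONDITION & SPEC =====
-- Pre_ excludes: key lists shorter than the field list (A raises IndexError), field widths > 8
-- (A raises ValueError on a negative shift), and negative field widths, where A's value is an
-- accident of its offset arithmetic and B's remainder-shifting recursion itself raises ValueError.
def Pre_parsed_one_byte_data (byte : Int) (bit_data_format : List Int) (bit_key_format : List String) : Prop :=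
  bit_data_format.length ≤ bit_key_format.length ∧
  ∀ w ∈ bit_data_format, 0 ≤ w ∧ w ≤ 8
instance (byte : Int) (bit_data_format : List Int) (bit_key_format : List String) : Decidable (Pre_parsed_one_byte_data byte bit_data_format bit_key_format) := by unfold Pre_parsed_one_byte_data; infer_instance

def pvWitness_parsed_one_byte_data : Int × List Int × List String := (173, [3, 2, 3], ["a", "b", "c"])

def Spec_parsed_one_byte_data (byte : Int) (bit_data_format : List Int) (bit_key_format : List String) (out : List (String × Int)) : Prop := out = parsed_one_byte_data_alt byte bit_data_format bit_key_format
instance (byte : Int) (bit_data_format : List Int) (bit_key_format : List String) (out : List (String × Int)) : Decidable (Spec_parsed_one_byte_data byte bit_data_format bit_key_format out) := by unfold Spec_parsed_one_byte_data; infer_instance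

-- ===== CLAIM (what is proved, stated in full; the proofs are below) =====
def Claim_equal_parsed_one_byte_data : Prop := ∀ (byte : Int) (bit_data_format : List Int) (bit_key_format : List String), Dom_parsed_one_byte_data byte bit_data_format bit_key_format → Pre_parsed_one_byte_data byte bit_data_format bit_key_format → Spec_parsed_one_byte_data byte bit_data_format bit_key_format (parsed_one_byte_data byte bit_data_format bit_key_format)

-- ===== LEMMAS AND PROOFS =====

theorem pvMain (byte : Int) (bkf : List String) :
    ∀ (ws : List Int), (∀ w ∈ ws, 0 ≤ w) → ∀ (k c : Nat) (d : PySem.Dict String Int),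
    pvParseLoopA byte bkf (PySem.List.enumerate ws (k : Int)) (c : Int) d
      = (pvFieldsB (byte >>> c) ws (bkf.drop k)).foldl (fun d p => d.insert p.1 p.2) d := by
  intro ws
  induction ws with
  | nil => intro _ k c d; simp [PySem.List.enumerate, pvParseLoopA, pvFieldsB]
  | cons w ws ih =>
    intro hnn k c d
    have hw : 0 ≤ w := hnn w (by simp)
    rw [PySem.List.enumerate_cons]
    simp only [pvParseLoopA, pvFieldsB, List.foldl_cons, get_multi_bit_val]
    have hkey : (PySem.List.pyGet? bkf (k : Int)).getD ""
        = (PySem.List.pyGet? (bkf.drop k) ((0 : Nat) : Int)).getD "" := by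
      rw [PySem.List.pyGet?_natCast, PySem.List.pyGet?_natCast, List.getElem?_drop]; simp
    have hcur : ((c : Int)).toNat = c := Int.toNat_natCast c
    have hc1 : (c : Int) + w = ((c + w.toNat : Nat) : Int) := by
      push_cast [Int.toNat_of_nonneg hw]; ring
    have hk1 : (k : Int) + 1 = ((k + 1 : Nat) : Int) := by push_cast; ring
    have hsh : byte >>> c >>> w.toNat = byte >>> (c + w.toNat) := by
      simpa using (Int.shiftRight_add byte c w.toNat).symm
    have hdd : (bkf.drop k).drop 1 = bkf.drop (k + 1) := by
      rw [List.drop_drop]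
    rw [hkey, hcur, hc1, hk1, hsh, hdd]
    exact ih (fun x hx => hnn x (List.mem_cons_of_mem _ hx)) (k + 1) (c + w.toNat) _

-- ===== VERDICT (by name: the statement is the Claim_ definition above) =====
theorem parsed_one_byte_data_spec : Claim_equal_parsed_one_byte_data := by
  intro byte bdf bkf _ hpre
  unfold Spec_parsed_one_byte_data parsed_one_byte_data parsed_one_byte_data_alt
  have h := pvMain byte bkf bdf (fun w hw => (hpre.2 w hw).1) 0 0 PySem.Dict.empty
  simp only [Nat.cast_zero, Int.shiftRight_zero, List.drop_zero] at h
  rw [h]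
  rfl
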